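-- pv_equiv track=rewrite | github.com/pypi-data/pypi-mirror-306 | packages/supMath/supMath-0.5.1.2-py3-none-any.whl/supMath/supOperators.py | type_sort
-- ===== SOURCE A (Python) =====
-- def is_prime(n):
--     """
--     Checks if arg is prime num
--
--     RESTRICTIONS:
--
--         Not optimal for large args (n>100_000_000)
--     """
--     if div_sigma(n,0,0)==2:
--         return True
--     return False
--
-- def type_sort(p):
--     """
--     Returns a dict in which primes and composite values from list
--     are sorted.
--     For example:
--
--         type_sort([1,2,7,4,9,11,11]) = {'primes': [2, 7, 11], 'composite': [4, 9], 'None': [1]}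
--
--     """
--     results = {}
--     primes=[]
--     composite=[]
--     none=[]
--     for i in p:
--         if is_prime(i):
--             if i not in primes:
--                 primes.append(i)
--         elif i == 1 or i == 0:
--             if i not in none:
--                 none.append(i)
--         else:
--             if i not in composite:
--                 composite.append(i)
--     results = {"primes": primes, "composite": composite, "None": none}
--     return results
--
-- def div_sigma(num,power,aliquocy):
--     """
--     div_sigma() can be characterized as sum of dividers of number.
--     For example:
--
--         div_sigma(12,1,0) = i[1]^1 + i[2]^1 + i[3]^1 + ... + i[n]^1 =
--         = 1 + 2 + 3 + 4 + 6 + 12 = 28, where 12 % i[any] = 0, n is quantity of dividers.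
--
--     This example shows us the return of div_sigma() where power equals 1 and aliquocy is 0
--     which means that we have to make sure that the number itself is added to the ending sum,
--     Evidently, if aliquocy equals 1, we must subtract this number from ending sum
--
--     The power of div_sigma() defines what power each unit of sum will be raised to.
--
--     Main properties:
--
--     1) If the number n  is prime (e.g 7) then it has only 2 dividers (1 and n),
--     So, sum of prime number dividers equals n+1:
--
--         div_sigma(7,0,0) = 1^0 +7^0 = 1 + 1 = 2 (power = 0 ==> returns the quantity of dividers)
--
--         div_sigma(7,1,0) = n + 1 = 7 + 1 = 8
--
--     2) if prime n is raised to the power x then div_sigma(n^x,0,0) = x + 1: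
--
--         div_sigma(7^2,0,0) = 1^0 + 7^0 + (7^2)^0 = 2 + 1 = 3
--
--     """
--     ending_sum=sum([d**power for d in range(1,num//2+1) if num%d==0])
--     if aliquocy==0:
--         ending_sum+=num**power
--     return ending_sum
-- ===== SOURCE B (Python) =====
-- def type_sort(p):
--     def prime(n):
--         # O(sqrt n) trial division instead of A's divisor-sum over [1, n//2]
--         if n < 2:
--             return False
--         d = 2
--         while d * d <= n:
--             if n % d == 0:
--                 return False
--             d += 1
--         return True
--
--     unique = list(dict.fromkeys(p))  # dedup once, first-occurrence order
--     primes, composite, none = [], [], []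
--     for i in unique:
--         if prime(i):
--             primes.append(i)
--         elif i == 1 or i == 0:
--             none.append(i)
--         else:
--             composite.append(i)
--     return {"primes": primes, "composite": composite, "None": none}
-- ===== Notes on version B (the rewrite author's own statement) =====
-- stated objective: faster
-- what changed: B deduplicates the whole list once up front (dict.fromkeys) and then classifies each unique element with an O(sqrt n) trial-division primality test, instead of A's per-element divisor-sum primality (scanning every d up to n//2) combined with per-bucket 'not in' membership scans.
import Mathlib
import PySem

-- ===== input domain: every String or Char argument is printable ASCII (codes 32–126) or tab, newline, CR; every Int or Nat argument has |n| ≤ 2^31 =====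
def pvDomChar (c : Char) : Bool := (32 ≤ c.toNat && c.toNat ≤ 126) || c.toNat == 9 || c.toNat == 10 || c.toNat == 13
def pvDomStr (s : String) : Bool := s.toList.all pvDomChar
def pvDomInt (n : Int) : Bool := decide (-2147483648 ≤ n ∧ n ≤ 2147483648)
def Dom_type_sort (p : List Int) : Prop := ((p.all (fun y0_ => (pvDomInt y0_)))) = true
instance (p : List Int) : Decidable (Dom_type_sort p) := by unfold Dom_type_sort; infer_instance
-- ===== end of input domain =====

-- B deduplicates the list once up front and classifies each unique element with a
-- trial-division primality test, instead of A's per-element divisor-sum primality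
-- plus per-bucket membership scans.

-- ===== PORT A =====
-- d ** power is ported as d ^ power.toNat: exact because div_sigma is only called with power = 0.
def div_sigma (num power aliquocy : Int) : Int :=
  let ending_sum : Int :=
    (((PySem.List.pyRange 1 (PySem.Int.floordiv num 2 + 1) 1).filter
        (fun d => PySem.Int.mod num d == 0)).map (fun d => d ^ power.toNat)).sum
  if aliquocy == 0 then ending_sum + num ^ power.toNat else ending_sum

def is_prime (n : Int) : Bool := if div_sigma n 0 0 == 2 then true else false

def pvStepA (st : List Int × List Int × List Int) (i : Int) : List Int × List Int × List Int :=
  let (primes, composite, noneL) := st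
  if is_prime i then
    (if primes.contains i then primes else primes ++ [i], composite, noneL)
  else if i == 1 || i == 0 then
    (primes, composite, if noneL.contains i then noneL else noneL ++ [i])
  else
    (primes, if composite.contains i then composite else composite ++ [i], noneL)

def type_sort (p : List Int) : List (String × List Int) :=
  let st := p.foldl pvStepA ([], [], [])
  [("primes", st.1), ("composite", st.2.1), ("None", st.2.2)]

-- ===== PORT B =====
-- the `while d * d <= n` loop runs over Nat here (n ≥ 2 at the call site, so this is exact)
def pvTrialDiv (m d : Nat) : Bool :=
  if d * d ≤ m then
    (if m % d == 0 then false else pvTrialDiv m (d + 1))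
  else true
termination_by m + 1 - d
decreasing_by
  rename_i h _
  have hd : d ≤ m := by
    rcases Nat.eq_zero_or_pos d with h0 | h0
    · omega
    · calc d = d * 1 := (Nat.mul_one d).symm
        _ ≤ d * d := Nat.mul_le_mul_left d h0
        _ ≤ m := h
  omega

def pvPrime (n : Int) : Bool := if n < 2 then false else pvTrialDiv n.toNat 2

def pvStepB (st : List Int × List Int × List Int) (i : Int) : List Int × List Int × List Int :=
  let (primes, composite, noneL) := st
  if pvPrime i then (primes ++ [i], composite, noneL)
  else if i == 1 || i == 0 then (primes, composite, noneL ++ [i])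
  else (primes, composite ++ [i], noneL)

def type_sort_alt (p : List Int) : List (String × List Int) :=
  let unique := p.foldl (fun acc i => if acc.contains i then acc else acc ++ [i]) []
  let st := unique.foldl pvStepB ([], [], [])
  [("primes", st.1), ("composite", st.2.1), ("None", st.2.2)]

-- ===== PRECONDITION & SPEC =====
def Spec_type_sort (p : List Int) (out : List (String × List Int)) : Prop := out = type_sort_alt p
instance (p : List Int) (out : List (String × List Int)) : Decidable (Spec_type_sort p out) := by unfold Spec_type_sort; infer_instance

-- ===== CLAIM (what is proved, stated in full; the proofs are below) =====
def Claim_equal_type_sort : Prop := ∀ (p : List Int), Dom_type_sort p → Spec_type_sort p (type_sort p)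

-- ===== LEMMAS AND PROOFS =====

-- first-occurrence dedup with an explicit "seen" accumulator
def pvDD (acc : List Int) : List Int → List Int
  | [] => acc
  | x :: xs => if acc.contains x then pvDD acc xs else pvDD (acc ++ [x]) xs

-- class predicates used by the canonical descriptions of both loops
def pvP (i : Int) : Bool := pvPrime i
def pvN (i : Int) : Bool := !pvPrime i && (i == 1 || i == 0)
def pvC (i : Int) : Bool := !pvPrime i && !(i == 1 || i == 0)

theorem pvTrialDiv_eq_true_iff (m : Nat) : ∀ d0, pvTrialDiv m d0 = true ↔
    ∀ d, d0 ≤ d → d * d ≤ m → m % d ≠ 0 := by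
  intro d0
  induction d0 using pvTrialDiv.induct m with
  | case1 d0 hle hmod =>
    rw [pvTrialDiv, if_pos hle, if_pos hmod]
    simp only [Bool.false_eq_true, false_iff, not_forall]
    exact ⟨d0, le_refl _, hle, by simpa using hmod⟩
  | case2 d0 hle hmod ih =>
    rw [pvTrialDiv, if_pos hle, if_neg hmod]
    rw [ih]
    constructor
    · intro h d hd hdd
      rcases Nat.eq_or_lt_of_le hd with rfl | hlt
      · simpa using hmod
      · exact h d hlt hdd
    · intro h d hd hdd
      exact h d (by omega) hdd
  | case3 d0 hle =>
    rw [pvTrialDiv, if_neg hle]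
    simp only [true_iff]
    intro d hd hdd
    exact absurd (le_trans (Nat.mul_le_mul hd hd) hdd) hle

theorem pvNat_bridge (m : Nat) (hm : 2 ≤ m) :
    (∀ e : Nat, 2 ≤ e → e ≤ m / 2 → ¬ e ∣ m) ↔ (∀ d : Nat, 2 ≤ d → d * d ≤ m → m % d ≠ 0) := by
  constructor
  · intro h d h2 hdd hmod
    have hdvd : d ∣ m := Nat.dvd_of_mod_eq_zero hmod
    have : d ≤ m / 2 := by
      rw [Nat.le_div_iff_mul_le (by norm_num)]
      calc d * 2 ≤ d * d := Nat.mul_le_mul_left d h2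
        _ ≤ m := hdd
    exact h d h2 this hdvd
  · intro h e h2 hle hdvd
    obtain ⟨c, hc⟩ := hdvd
    have h2e : e * 2 ≤ m := (Nat.le_div_iff_mul_le (by norm_num)).mp hle
    have hc2 : 2 ≤ c := Nat.le_of_mul_le_mul_left (hc ▸ h2e) (by omega)
    rcases le_total e c with hec | hce
    · exact h e h2 (by calc e * e ≤ e * c := Nat.mul_le_mul_left e hec
        _ = m := hc.symm) (by rw [hc]; simp [Nat.mul_mod_right])
    · refine h c hc2 ?_ ?_
      · calc c * c ≤ e * c := Nat.mul_le_mul_right c hce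
          _ = m := hc.symm
      · rw [hc, Nat.mul_comm]; simp [Nat.mul_mod_right]

theorem pv_sum_ones (l : List Int) : (l.map (fun _ => (1:Int))).sum = l.length := by
  induction l with
  | nil => rfl
  | cons x xs ih => simp [ih]; omega

theorem pv_div_sigma_eq (n : Int) : div_sigma n 0 0 =
    ((PySem.List.pyRange 1 (PySem.Int.floordiv n 2 + 1) 1).filter
      (fun d => PySem.Int.mod n d == 0)).length + 1 := by
  simp only [div_sigma, Int.toNat_zero, pow_zero]
  rw [pv_sum_ones]
  simp

theorem pvPrime_eq_is_prime (n : Int) : is_prime n = pvPrime n := by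
  by_cases hn : n < 2
  · have hb : PySem.Int.floordiv n 2 + 1 ≤ 1 := by
      have : PySem.Int.floordiv n 2 < 1 :=
        (PySem.Int.floordiv_lt_iff_lt_mul (by norm_num)).mpr (by omega)
      omega
    have hr : PySem.List.pyRange 1 (PySem.Int.floordiv n 2 + 1) 1 = [] :=
      PySem.List.pyRange_one_eq_nil hb
    rw [is_prime, pv_div_sigma_eq, hr]
    simp [pvPrime, hn]
  · simp only [not_lt] at hn
    set m : Nat := n.toNat with hm
    have hmn : (m : Int) = n := Int.toNat_of_nonneg (by omega)
    have hm2 : 2 ≤ m := by omega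
    have hfd : PySem.Int.floordiv n 2 = ((m / 2 : Nat) : Int) := by
      rw [PySem.Int.floordiv_eq_ediv_of_pos (by norm_num), ← hmn]
      omega
    have h1 : (1:Int) < PySem.Int.floordiv n 2 + 1 := by
      have : (1:Int) ≤ PySem.Int.floordiv n 2 :=
        (PySem.Int.le_floordiv_iff_mul_le (by norm_num)).mpr (by omega)
      omega
    rw [is_prime, pv_div_sigma_eq, PySem.List.pyRange_one_cons h1,
      show (1:Int) + 1 = 2 from by norm_num]
    have hone : PySem.Int.mod n 1 = 0 := by
      rw [PySem.Int.mod_eq_emod_of_pos (by norm_num)]; simp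
    rw [List.filter_cons]
    simp only [hone, beq_self_eq_true, if_pos, List.length_cons]
    have key : (((PySem.List.pyRange 2 (PySem.Int.floordiv n 2 + 1) 1).filter
        (fun d => PySem.Int.mod n d == 0)) = [] ↔
        ∀ e : Nat, 2 ≤ e → e ≤ m / 2 → ¬ e ∣ m) := by
      rw [List.filter_eq_nil_iff]
      constructor
      · intro h e h2 hle hdvd
        have hmem : (e : Int) ∈ PySem.List.pyRange 2 (PySem.Int.floordiv n 2 + 1) 1 := by
          rw [PySem.List.mem_pyRange_one]
          constructor
          · exact_mod_cast h2
          · rw [hfd]; push_cast; omega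
        refine h _ hmem ?_
        simp only [beq_iff_eq]
        rw [PySem.Int.mod_eq_zero_iff_dvd]
        rw [← hmn]
        exact_mod_cast hdvd
      · intro h d hmem hmod
        rw [PySem.List.mem_pyRange_one, hfd] at hmem
        simp only [beq_iff_eq, PySem.Int.mod_eq_zero_iff_dvd] at hmod
        have h0 : 0 ≤ d := by omega
        have : d.toNat ∣ m := by
          rw [← Int.natCast_dvd_natCast]
          rw [hmn, Int.toNat_of_nonneg h0]
          exact hmod
        refine h d.toNat (by omega) (by omega) this
    have keyB : pvTrialDiv m 2 = true ↔ ∀ e : Nat, 2 ≤ e → e ≤ m / 2 → ¬ e ∣ m := by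
      rw [pvTrialDiv_eq_true_iff, ← pvNat_bridge m hm2]
    simp only [pvPrime, if_neg (by omega : ¬ n < 2), ← hm]
    by_cases hres : ((PySem.List.pyRange 2 (PySem.Int.floordiv n 2 + 1) 1).filter
        (fun d => PySem.Int.mod n d == 0)) = []
    · rw [hres]
      have : pvTrialDiv m 2 = true := keyB.mpr (key.mp hres)
      rw [this]
      norm_num
    · have hlen : ((PySem.List.pyRange 2 (PySem.Int.floordiv n 2 + 1) 1).filter
        (fun d => PySem.Int.mod n d == 0)).length ≠ 0 := by
        simpa [List.length_eq_zero_iff] using hres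
      have : pvTrialDiv m 2 = false := by
        rw [← Bool.not_eq_true, keyB]
        intro hall
        exact hres (key.mpr hall)
      rw [this]
      simp only [beq_iff_eq]
      rw [if_neg]
      intro hcontra
      have : ((PySem.List.pyRange 2 (PySem.Int.floordiv n 2 + 1) 1).filter
        (fun d => PySem.Int.mod n d == 0)).length = 0 := by
        push_cast at hcontra
        omega
      exact hlen this

theorem pvFold_dd (p : List Int) : ∀ acc,
    p.foldl (fun acc i => if acc.contains i then acc else acc ++ [i]) acc = pvDD acc p := by
  induction p with
  | nil => intro acc; rfl
  | cons x xs ih => intro acc; simp only [List.foldl_cons, pvDD]; split <;> exact ih _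

theorem pvDD_cons (acc : List Int) (x : Int) (l : List Int) :
    pvDD acc (x :: l) = pvDD (if acc.contains x then acc else acc ++ [x]) l := by
  simp only [pvDD]; split <;> rfl

theorem pvLoopA (p : List Int) : ∀ pr co no,
    p.foldl pvStepA (pr, co, no) =
      (pvDD pr (p.filter pvP), pvDD co (p.filter pvC), pvDD no (p.filter pvN)) := by
  induction p with
  | nil => intro pr co no; rfl
  | cons x xs ih =>
    intro pr co no
    rw [List.foldl_cons]
    by_cases hP : pvPrime x = true
    · have hA : is_prime x = true := by rw [pvPrime_eq_is_prime, hP]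
      simp [pvStepA, hA, List.filter_cons, pvP, pvC, pvN, hP, pvDD_cons, ih]
    · have hA : is_prime x = false := by rw [pvPrime_eq_is_prime]; simpa using hP
      simp only [Bool.not_eq_true] at hP
      by_cases hN : (x == 1 || x == 0) = true
      · simp [pvStepA, hA, hN, List.filter_cons, pvP, pvC, pvN, hP, pvDD_cons, ih]
      · simp only [Bool.not_eq_true] at hN
        simp [pvStepA, hA, hN, List.filter_cons, pvP, pvC, pvN, hP, pvDD_cons, ih]

theorem pvLoopB (u : List Int) : ∀ pr co no,
    u.foldl pvStepB (pr, co, no) =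
      (pr ++ u.filter pvP, co ++ u.filter pvC, no ++ u.filter pvN) := by
  induction u with
  | nil => intro pr co no; simp
  | cons x xs ih =>
    intro pr co no
    rw [List.foldl_cons]
    by_cases hP : pvPrime x = true
    · simp [pvStepB, hP, List.filter_cons, pvP, pvC, pvN, ih]
    · simp only [Bool.not_eq_true] at hP
      by_cases hN : (x == 1 || x == 0) = true
      · simp [pvStepB, hP, hN, List.filter_cons, pvP, pvC, pvN, ih]
      · simp only [Bool.not_eq_true] at hN
        simp [pvStepB, hP, hN, List.filter_cons, pvP, pvC, pvN, ih]

theorem pvFilter_dd (Q : Int → Bool) (p : List Int) : ∀ s,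
    (pvDD s p).filter Q = pvDD (s.filter Q) (p.filter Q) := by
  induction p with
  | nil => intro s; rfl
  | cons x xs ih =>
    intro s
    by_cases hQ : Q x = true <;> by_cases hx : x ∈ s <;>
      simp only [pvDD, List.filter_cons, hQ, if_pos, Bool.false_eq_true, ite_false, ite_true] <;>
      simp only [List.contains_eq_mem, hx, decide_true, decide_false, List.mem_filter, hQ,
        and_true, ite_true, ite_false, Bool.false_eq_true] <;>
      rw [ih] <;> simp [List.filter_append, hQ]

theorem type_sort_spec' (p : List Int) : type_sort p = type_sort_alt p := by
  rw [type_sort, type_sort_alt, pvFold_dd, pvLoopA, pvLoopB]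
  have h1 := pvFilter_dd pvP p []
  have h2 := pvFilter_dd pvC p []
  have h3 := pvFilter_dd pvN p []
  simp only [List.filter_nil] at h1 h2 h3
  rw [← h1, ← h2, ← h3]
  simp

-- ===== VERDICT (by name: the statement is the Claim_ definition above) =====
theorem type_sort_spec : Claim_equal_type_sort := by
  intro p _
  exact type_sort_spec' p
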